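-- pv_equiv track=rewrite | github.com/snow-QingYang/El-Agente-Math | src/arxiv_downloader.py | parse_arxiv_url
-- ===== SOURCE A (Python) =====
-- def parse_arxiv_url(url: str) -> str:
--     """
--     Extract arXiv paper ID from a URL.
--
--     Args:
--         url: arXiv URL (e.g., https://arxiv.org/abs/2301.12345)
--
--     Returns:
--         Paper ID (e.g., "2301.12345")
--
--     Examples:
--         >>> parse_arxiv_url("https://arxiv.org/abs/2301.12345")
--         "2301.12345"
--     """
--     # Handle various arXiv URL formats
--     # https://arxiv.org/abs/1706.03762
--     # https://arxiv.org/pdf/1706.03762.pdf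
--     # http://arxiv.org/abs/1706.03762
--     # or just the ID itself: 1706.03762
--
--     url = url.strip()
--
--     # If it's already just an ID, return it
--     if not url.startswith("http"):
--         return url
--
--     # Extract ID from URL
--     parts = url.rstrip("/").split("/")
--
--     # Find 'abs' or 'pdf' in the URL and get the next part
--     for i, part in enumerate(parts):
--         if part in ["abs", "pdf"] and i + 1 < len(parts):
--             arxiv_id = parts[i + 1]
--             # Remove .pdf extension if present
--             if arxiv_id.endswith(".pdf"):
--                 arxiv_id = arxiv_id[:-4]
--             return arxiv_id
--
--     # If we couldn't parse it, raise an error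
--     raise ValueError(f"Could not extract arXiv ID from URL: {url}")
-- ===== SOURCE B (Python) =====
-- def parse_arxiv_url(url: str) -> str:
--     # Alternative: instead of split('/')+enumerate, locate the leftmost whole
--     # "/abs/" or "/pdf/" segment with two str.find calls and slice the id out.
--     url = url.strip()
--     if not url.startswith("http"):
--         return url
--     s = url.rstrip("/")
--     a = s.find("/abs/")
--     p = s.find("/pdf/")
--     j = p if a < 0 else (a if p < 0 else min(a, p))
--     if j < 0:
--         raise ValueError(f"Could not extract arXiv ID from URL: {url}")
--     rest = s[j + 5:]
--     k = rest.find("/")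
--     seg = rest if k < 0 else rest[:k]
--     return seg.removesuffix(".pdf")
-- ===== Notes on version B (the rewrite author's own statement) =====
-- stated objective: alternative
-- what changed: Replaces A's rstrip/split('/')-then-enumerate index loop over the list of path pieces by two str.find calls that locate the leftmost whole '/abs/' or '/pdf/' substring, followed by slicing the id out up to the next '/' and a removesuffix('.pdf'); no list of parts is ever built.
import Mathlib
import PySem

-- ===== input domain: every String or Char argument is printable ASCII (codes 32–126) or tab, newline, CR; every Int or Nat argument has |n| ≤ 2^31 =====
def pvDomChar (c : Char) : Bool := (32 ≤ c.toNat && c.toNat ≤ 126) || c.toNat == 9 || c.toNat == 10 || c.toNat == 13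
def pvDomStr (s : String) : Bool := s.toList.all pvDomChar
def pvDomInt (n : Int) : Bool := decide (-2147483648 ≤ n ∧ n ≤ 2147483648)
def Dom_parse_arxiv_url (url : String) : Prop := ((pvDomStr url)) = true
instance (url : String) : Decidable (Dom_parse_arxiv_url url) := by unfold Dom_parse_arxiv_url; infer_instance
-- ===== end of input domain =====

-- B replaces A's split('/')+enumerate loop by two str.find calls locating the leftmost
-- whole '/abs/' or '/pdf/' substring and slicing; same value wherever A returns.

-- ===== PORT A =====
-- the 'for i, part in enumerate(parts): if part in ["abs","pdf"] and i+1 < len(parts)' loop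
def pvFindA : List (List Char) → Option (List Char)
  | [] => none
  | [_] => none
  | p :: q :: rest =>
    if p = "abs".toList ∨ p = "pdf".toList then some q else pvFindA (q :: rest)

def parse_arxiv_url (url : String) : String :=
  let t := PySem.Chars.strip url.toList
  if !(PySem.Chars.startswith t "http".toList) then String.ofList t
  else
    -- url.rstrip("/"): hand port (PySem has no chars-argument rstrip); exact: drops the trailing run of '/'
    let s := (t.reverse.dropWhile (· == '/')).reverse
    let parts := PySem.Chars.splitOn s "/".toList
    match pvFindA parts with
    | some aid =>
        String.ofList (if PySem.Chars.endswith aid ".pdf".toList then PySem.List.slice aid none (some (-4)) else aid)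
    | none => ""   -- Python raises ValueError here; excluded by Pre_parse_arxiv_url

-- ===== PORT B =====
def parse_arxiv_url_alt (url : String) : String :=
  let t := PySem.Chars.strip url.toList
  if !(PySem.Chars.startswith t "http".toList) then String.ofList t
  else
    -- url.rstrip("/"): hand port, as in port A; exact
    let s := (t.reverse.dropWhile (· == '/')).reverse
    let a := PySem.Chars.find s "/abs/".toList
    let p := PySem.Chars.find s "/pdf/".toList
    let j := if a < 0 then p else if p < 0 then a else min a p
    if j < 0 then ""   -- Python raises ValueError here; excluded by Pre_parse_arxiv_url
    else
      let rest := PySem.List.slice s (some (j + 5)) none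
      let k := PySem.Chars.find rest "/".toList
      let seg := if k < 0 then rest else PySem.List.slice rest none (some k)
      -- seg.removesuffix(".pdf"): hand port; exact: drops the 4-char suffix onceiff present
      String.ofList (if List.isSuffixOf ".pdf".toList seg then seg.take (seg.length - 4) else seg)

-- ===== PRECONDITION & SPEC =====
-- Pre_ excludes exactly the inputs on which A raises ValueError: stripped url starts with
-- "http" but, after dropping trailing '/', contains no whole "/abs/" or "/pdf/" segment.
def Pre_parse_arxiv_url (url : String) : Prop :=
  PySem.Chars.startswith (PySem.Chars.strip url.toList) "http".toList = false ∨
    PySem.Chars.isIn "/abs/".toList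
      (((PySem.Chars.strip url.toList).reverse.dropWhile (· == '/')).reverse) = true ∨
    PySem.Chars.isIn "/pdf/".toList
      (((PySem.Chars.strip url.toList).reverse.dropWhile (· == '/')).reverse) = true
instance (url : String) : Decidable (Pre_parse_arxiv_url url) := by
  unfold Pre_parse_arxiv_url; infer_instance
def pvWitness_parse_arxiv_url : String := "https://arxiv.org/abs/2301.12345"

def Spec_parse_arxiv_url (url : String) (out : String) : Prop := out = parse_arxiv_url_alt url
instance (url : String) (out : String) : Decidable (Spec_parse_arxiv_url url out) := by
  unfold Spec_parse_arxiv_url; infer_instance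

-- ===== CLAIM (what is proved, stated in full; the proofs are below) =====
def Claim_equal_parse_arxiv_url : Prop :=
  ∀ (url : String), Dom_parse_arxiv_url url → Pre_parse_arxiv_url url →
    Spec_parse_arxiv_url url (parse_arxiv_url url)

-- ===== LEMMAS AND PROOFS =====

-- proof-side helper: the leftmost position scan both ports are proved equal to
def pvScanB : List Char → Option (List Char)
  | [] => none
  | c :: rest =>
    if List.isPrefixOf "/abs/".toList (c :: rest) || List.isPrefixOf "/pdf/".toList (c :: rest) then
      some (((c :: rest).drop 5).takeWhile (· != '/'))
    else pvScanB rest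

theorem pv_abs_toList : "/abs/".toList = ['/', 'a', 'b', 's', '/'] := by decide
theorem pv_pdf_toList : "/pdf/".toList = ['/', 'p', 'd', 'f', '/'] := by decide
theorem pv_absq_toList : "abs".toList = ['a', 'b', 's'] := by decide
theorem pv_pdfq_toList : "pdf".toList = ['p', 'd', 'f'] := by decide
theorem pv_http_toList : "http".toList = ['h', 't', 't', 'p'] := by decide
theorem pv_slash_toList : "/".toList = ['/'] := by decide

-- the scan skips a slash-free block
theorem pv_scan_append (q cs : List Char) (hq : ∀ c ∈ q, c ≠ '/') :
    pvScanB (q ++ cs) = pvScanB cs := by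
  induction q with
  | nil => simp
  | cons c q' ih =>
    have hc : c ≠ '/' := hq c (by simp)
    have h1 : List.isPrefixOf "/abs/".toList (c :: (q' ++ cs)) = false := by
      rw [pv_abs_toList]; simp [List.isPrefixOf]; intro h; exact absurd h.symm hc
    have h2 : List.isPrefixOf "/pdf/".toList (c :: (q' ++ cs)) = false := by
      rw [pv_pdf_toList]; simp [List.isPrefixOf]; intro h; exact absurd h.symm hc
    show pvScanB (c :: (q' ++ cs)) = pvScanB cs
    rw [pvScanB, h1, h2]
    simpa using ih (fun x hx => hq x (by simp [hx]))

theorem pv_scan_nil (q : List Char) (hq : ∀ c ∈ q, c ≠ '/') : pvScanB q = none := by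
  have := pv_scan_append q [] hq
  simpa [pvScanB] using this

-- whole-segment matching: the pattern P++['/'] sits at q++'/'::r2 iff q = P
theorem pv_prefix_seg (P : List Char) (hP : '/' ∉ P) :
    ∀ (q r2 : List Char), '/' ∉ q → ((P ++ ['/']) <+: (q ++ '/' :: r2) ↔ q = P) := by
  induction P with
  | nil =>
    intro q r2 hq
    cases q with
    | nil => simp
    | cons c q' =>
      have hc : c ≠ '/' := by intro h; exact hq (by simp [h])
      simp [List.cons_prefix_cons]
      intro h; exact absurd h.symm hc
  | cons p P' ih =>
    intro q r2 hq
    have hp : p ≠ '/' := by intro h; exact hP (by simp [h])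
    cases q with
    | nil =>
      simp [List.cons_prefix_cons]
      intro h; exact absurd h hp
    | cons c q' =>
      have hP' : '/' ∉ P' := fun h => hP (by simp [h])
      have hq' : '/' ∉ q' := fun h => hq (by simp [h])
      simp [List.cons_prefix_cons, ih hP' q' r2 hq']
      intro _
      constructor <;> (intro h; exact h.symm)

-- PySem.Chars.splitOn on separator "/" is List.splitOnP (· == '/')
theorem pv_go_eq (fuel : Nat) :
    ∀ (l cur : List Char) (acc : List (List Char)), l.length < fuel →
      PySem.Chars.splitOn.go ['/'] fuel l cur acc
        = acc.reverse ++ List.modifyHead (fun x => cur.reverse ++ x) (List.splitOnP (· == '/') l) := by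
  induction fuel with
  | zero => intro l cur acc h; omega
  | succ f ih =>
    intro l cur acc h
    cases l with
    | nil =>
      simp [PySem.Chars.splitOn.go, List.splitOnP_nil, List.modifyHead]
    | cons c rest =>
      by_cases hc : c = '/'
      · subst hc
        have hpre : List.isPrefixOf ['/'] ('/' :: rest) = true := by simp [List.isPrefixOf]
        rw [PySem.Chars.splitOn.go]
        simp only [hpre, if_true]
        rw [show List.drop (['/'].length) ('/' :: rest) = rest from rfl]
        rw [ih rest [] (List.reverse cur :: acc) (by simp at h ⊢; omega)]
        rw [List.splitOnP_cons]
        simp only [beq_self_eq_true, if_true]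
        cases hsp : List.splitOnP (· == '/') rest <;>
          simp [List.modifyHead]
      · have hpre : List.isPrefixOf ['/'] (c :: rest) = false := by
          simp [List.isPrefixOf]; intro h'; exact absurd h'.symm hc
        rw [PySem.Chars.splitOn.go]
        simp only [hpre, Bool.false_eq_true, if_false]
        rw [ih rest (c :: cur) acc (by simp at h ⊢; omega)]
        rw [List.splitOnP_cons]
        have hcb : (c == '/') = false := by simp [hc]
        simp only [hcb, Bool.false_eq_true, if_false]
        cases hsp : List.splitOnP (· == '/') rest <;>
          simp [List.modifyHead]

theorem pv_splitOn_eq (l : List Char) :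
    PySem.Chars.splitOn l ['/'] = List.splitOnP (· == '/') l := by
  unfold PySem.Chars.splitOn
  rw [pv_go_eq (l.length + 1) l [] [] (by omega)]
  cases hsp : List.splitOnP (· == '/') l <;> simp [List.modifyHead]

theorem pv_splitOnP_no_slash (r : List Char) (h : '/' ∉ r) :
    List.splitOnP (· == '/') r = [r] := by
  induction r with
  | nil => simp [List.splitOnP_nil]
  | cons c rest ih =>
    have hc : (c == '/') = false := by simp; intro hh; exact h (by simp [hh])
    rw [List.splitOnP_cons]
    simp only [hc, Bool.false_eq_true, if_false]
    rw [ih (fun hh => h (by simp [hh]))]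
    simp [List.modifyHead]

theorem pv_splitOnP_seg (q r2 : List Char) (hq : '/' ∉ q) :
    List.splitOnP (· == '/') (q ++ '/' :: r2) = q :: List.splitOnP (· == '/') r2 := by
  induction q with
  | nil => simp [List.splitOnP_cons]
  | cons c q' ih =>
    have hc : (c == '/') = false := by simp; intro hh; exact hq (by simp [hh])
    rw [List.cons_append, List.splitOnP_cons]
    simp only [hc, Bool.false_eq_true, if_false]
    rw [ih (fun hh => hq (by simp [hh]))]
    simp [List.modifyHead]

theorem pv_splitOnP_head (l : List Char) :
    (List.splitOnP (· == '/') l).head? = some (l.takeWhile (· != '/')) := by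
  induction l with
  | nil => simp [List.splitOnP_nil]
  | cons c rest ih =>
    rw [List.splitOnP_cons]
    by_cases hc : c = '/'
    · subst hc; simp
    · have hcb : (c == '/') = false := by simp [hc]
      simp only [hcb, Bool.false_eq_true, if_false]
      cases hsp : List.splitOnP (· == '/') rest with
      | nil => rw [hsp] at ih; simp at ih
      | cons w tl =>
        rw [hsp] at ih; simp at ih
        simp [List.modifyHead, hc, ih]

-- main loop invariant: A's loop on the remaining pieces = the scan from the '/' before them
theorem pv_main : ∀ (n : Nat) (r : List Char), r.length ≤ n →
    pvFindA (List.splitOnP (· == '/') r) = pvScanB ('/' :: r) := by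
  intro n
  induction n with
  | zero =>
    intro r hr
    have : r = [] := List.length_eq_zero_iff.mp (by omega)
    subst this
    simp [List.splitOnP_nil, pvFindA, pvScanB, pv_abs_toList, pv_pdf_toList, List.isPrefixOf]
  | succ n ih =>
    intro r hr
    by_cases hmem : '/' ∈ r
    · -- r = q ++ '/' :: r2 with q slash-free
      have hdw : r.dropWhile (· != '/') ≠ [] := by
        intro hnil
        have := List.dropWhile_eq_nil_iff.mp hnil
        have := this '/' hmem
        simp at this
      obtain ⟨d, r2, hd⟩ : ∃ d r2, r.dropWhile (· != '/') = d :: r2 := by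
        cases hcase : r.dropWhile (· != '/') with
        | nil => exact absurd hcase hdw
        | cons d r2 => exact ⟨d, r2, rfl⟩
      have hdhead : d = '/' := by
        have h0 := List.head_dropWhile_not (fun x => x != '/') hdw
        simp only [hd, List.head_cons] at h0
        simpa using h0
      subst hdhead
      have hre : r = r.takeWhile (· != '/') ++ '/' :: r2 := by
        conv_lhs => rw [← List.takeWhile_append_dropWhile (p := (· != '/')) (l := r)]
        rw [hd]
      set q := r.takeWhile (· != '/') with hqdef
      have hq : '/' ∉ q := by
        intro hmm
        have := List.mem_takeWhile_imp hmm
        simp at this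
      have hqall : ∀ c ∈ q, c ≠ '/' := by
        intro c hc hcc
        subst hcc; exact hq hc
      have hlen : r2.length ≤ n := by
        have : r.length = q.length + (r2.length + 1) := by
          rw [hre]; simp
        omega
      obtain ⟨w, tl, hsp⟩ : ∃ w tl, List.splitOnP (· == '/') r2 = w :: tl := by
        cases hcase : List.splitOnP (· == '/') r2 with
        | nil => have := pv_splitOnP_head r2; rw [hcase] at this; simp at this
        | cons w tl => exact ⟨w, tl, rfl⟩
      have hw : w = r2.takeWhile (· != '/') := by
        have := pv_splitOnP_head r2; rw [hsp] at this; simpa using this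
      rw [hre, pv_splitOnP_seg q r2 hq, hsp]
      by_cases hqual : q = "abs".toList ∨ q = "pdf".toList
      · -- qualifying segment: both return the piece after it
        have hfind : pvFindA (q :: w :: tl) = some w := by
          simp only [pvFindA]; rw [if_pos hqual]
        rw [hfind]
        symm
        rcases hqual with hqa | hqp
        · rw [hqa, pv_absq_toList]
          show pvScanB ('/' :: 'a' :: 'b' :: 's' :: '/' :: r2) = some w
          rw [pvScanB]
          have : List.isPrefixOf "/abs/".toList ('/' :: 'a' :: 'b' :: 's' :: '/' :: r2) = true := by
            rw [pv_abs_toList]; simp [List.isPrefixOf]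
          rw [this]
          simp [hw]
        · rw [hqp, pv_pdfq_toList]
          show pvScanB ('/' :: 'p' :: 'd' :: 'f' :: '/' :: r2) = some w
          rw [pvScanB]
          have : List.isPrefixOf "/pdf/".toList ('/' :: 'p' :: 'd' :: 'f' :: '/' :: r2) = true := by
            rw [pv_pdf_toList]; simp [List.isPrefixOf]
          rw [this]
          simp [hw]
      · rw [not_or] at hqual
        obtain ⟨hqa, hqp⟩ := hqual
        have hfind : pvFindA (q :: w :: tl) = pvFindA (w :: tl) := by
          simp only [pvFindA]; rw [if_neg (not_or.mpr ⟨hqa, hqp⟩)]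
        rw [hfind, ← hsp, ih r2 hlen]
        -- scan side: no match at the leading '/', skip q, reach '/'::r2
        have hnabs : List.isPrefixOf "/abs/".toList ('/' :: (q ++ '/' :: r2)) = false := by
          rw [pv_abs_toList]
          by_contra hcon
          have : List.isPrefixOf ['/', 'a', 'b', 's', '/'] ('/' :: (q ++ '/' :: r2)) = true := by
            revert hcon; cases List.isPrefixOf ['/', 'a', 'b', 's', '/'] ('/' :: (q ++ '/' :: r2)) <;> simp
          have hpre : ['a', 'b', 's'] ++ ['/'] <+: (q ++ '/' :: r2) := by
            have := List.isPrefixOf_iff_prefix.mp this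
            rw [List.cons_prefix_cons] at this
            simpa using this.2
          have := (pv_prefix_seg ['a', 'b', 's'] (by decide) q r2 hq).mp hpre
          rw [← pv_absq_toList] at this
          exact hqa this
        have hnpdf : List.isPrefixOf "/pdf/".toList ('/' :: (q ++ '/' :: r2)) = false := by
          rw [pv_pdf_toList]
          by_contra hcon
          have : List.isPrefixOf ['/', 'p', 'd', 'f', '/'] ('/' :: (q ++ '/' :: r2)) = true := by
            revert hcon; cases List.isPrefixOf ['/', 'p', 'd', 'f', '/'] ('/' :: (q ++ '/' :: r2)) <;> simp
          have hpre : ['p', 'd', 'f'] ++ ['/'] <+: (q ++ '/' :: r2) := by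
            have := List.isPrefixOf_iff_prefix.mp this
            rw [List.cons_prefix_cons] at this
            simpa using this.2
          have := (pv_prefix_seg ['p', 'd', 'f'] (by decide) q r2 hq).mp hpre
          rw [← pv_pdfq_toList] at this
          exact hqp this
        rw [show pvScanB ('/' :: (q ++ '/' :: r2)) = pvScanB (q ++ '/' :: r2) by
          rw [pvScanB, hnabs, hnpdf]; simp]
        rw [pv_scan_append q ('/' :: r2) hqall]
    · -- no '/' in r: A's loop sees a single piece, the scan finds nothing
      rw [pv_splitOnP_no_slash r hmem]
      have hnabs : List.isPrefixOf "/abs/".toList ('/' :: r) = false := by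
        rw [pv_abs_toList]
        by_contra hcon
        have : List.isPrefixOf ['/', 'a', 'b', 's', '/'] ('/' :: r) = true := by
          revert hcon; cases List.isPrefixOf ['/', 'a', 'b', 's', '/'] ('/' :: r) <;> simp
        have hpre := List.isPrefixOf_iff_prefix.mp this
        rw [List.cons_prefix_cons] at hpre
        exact hmem (hpre.2.subset (by simp))
      have hnpdf : List.isPrefixOf "/pdf/".toList ('/' :: r) = false := by
        rw [pv_pdf_toList]
        by_contra hcon
        have : List.isPrefixOf ['/', 'p', 'd', 'f', '/'] ('/' :: r) = true := by
          revert hcon; cases List.isPrefixOf ['/', 'p', 'd', 'f', '/'] ('/' :: r) <;> simp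
        have hpre := List.isPrefixOf_iff_prefix.mp this
        rw [List.cons_prefix_cons] at hpre
        exact hmem (hpre.2.subset (by simp))
      rw [show pvScanB ('/' :: r) = pvScanB r by rw [pvScanB, hnabs, hnpdf]; simp]
      rw [pv_scan_nil r (fun c hc hcc => hmem (hcc ▸ hc))]
      simp [pvFindA]

-- a string whose first char is not '/', 'a' or 'p': A's find-loop = the scan
theorem pv_top (c : Char) (rest : List Char) (hc : c ≠ '/') (ha : c ≠ 'a') (hp : c ≠ 'p') :
    pvFindA (List.splitOnP (· == '/') (c :: rest)) = pvScanB (c :: rest) := by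
  by_cases hmem : '/' ∈ (c :: rest)
  · have hdw : (c :: rest).dropWhile (· != '/') ≠ [] := by
      intro hnil
      have := List.dropWhile_eq_nil_iff.mp hnil '/' hmem
      simp at this
    obtain ⟨d, r2, hd⟩ : ∃ d r2, (c :: rest).dropWhile (· != '/') = d :: r2 := by
      cases hcase : (c :: rest).dropWhile (· != '/') with
      | nil => exact absurd hcase hdw
      | cons d r2 => exact ⟨d, r2, rfl⟩
    have hdhead : d = '/' := by
      have h0 := List.head_dropWhile_not (fun x => x != '/') hdw
      simp only [hd, List.head_cons] at h0
      simpa using h0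
    subst hdhead
    have hre : c :: rest = (c :: rest).takeWhile (· != '/') ++ '/' :: r2 := by
      conv_lhs => rw [← List.takeWhile_append_dropWhile (p := (· != '/')) (l := c :: rest)]
      rw [hd]
    set q := (c :: rest).takeWhile (· != '/') with hqdef
    have hqc : q = c :: rest.takeWhile (· != '/') := by
      rw [hqdef]; simp [hc]
    have hq : '/' ∉ q := by
      intro hmm
      have := List.mem_takeWhile_imp hmm
      simp at this
    have hqall : ∀ x ∈ q, x ≠ '/' := fun x hx hxx => hq (hxx ▸ hx)
    obtain ⟨w, tl, hsp⟩ : ∃ w tl, List.splitOnP (· == '/') r2 = w :: tl := by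
      cases hcase : List.splitOnP (· == '/') r2 with
      | nil => have := pv_splitOnP_head r2; rw [hcase] at this; simp at this
      | cons w tl => exact ⟨w, tl, rfl⟩
    have hqa : q ≠ "abs".toList := by
      rw [hqc, pv_absq_toList]; intro hh; injection hh with h1 _; exact ha h1
    have hqp : q ≠ "pdf".toList := by
      rw [hqc, pv_pdfq_toList]; intro hh; injection hh with h1 _; exact hp h1
    conv_lhs => rw [hre]
    conv_rhs => rw [hre]
    rw [pv_splitOnP_seg q r2 hq, hsp]
    have hfind : pvFindA (q :: w :: tl) = pvFindA (w :: tl) := by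
      simp only [pvFindA]; rw [if_neg (not_or.mpr ⟨hqa, hqp⟩)]
    rw [hfind, ← hsp, pv_main r2.length r2 (le_refl _)]
    rw [pv_scan_append q ('/' :: r2) hqall]
  · rw [pv_splitOnP_no_slash _ hmem]
    rw [pv_scan_nil _ (fun x hx hxx => hmem (hxx ▸ hx))]
    simp [pvFindA]

-- rstrip("/") keeps the "http" prefix
theorem pv_rstrip_http (t : List Char) (h : "http".toList <+: t) :
    "http".toList <+: (t.reverse.dropWhile (· == '/')).reverse := by
  rw [pv_http_toList] at h ⊢
  obtain ⟨u, hu⟩ := h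
  subst hu
  rw [show (['h', 't', 't', 'p'] ++ u).reverse = u.reverse ++ ['p', 't', 't', 'h'] by simp]
  rw [List.dropWhile_append]
  cases he : (List.dropWhile (fun x => x == '/') u.reverse).isEmpty with
  | true =>
    rw [if_pos (by trivial)]
    decide
  | false =>
    rw [if_neg (by simp)]
    rw [List.reverse_append, show List.reverse ['p', 't', 't', 'h'] = ['h', 't', 't', 'p'] by decide]
    exact List.prefix_append _ _

theorem pv_A_eq_scan (s : List Char) (h : "http".toList <+: s) :
    pvFindA (PySem.Chars.splitOn s "/".toList) = pvScanB s := by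
  rw [pv_http_toList] at h
  obtain ⟨u, hu⟩ := h
  rw [← hu]
  rw [pv_slash_toList, pv_splitOn_eq]
  exact pv_top 'h' ('t' :: 't' :: 'p' :: u) (by decide) (by decide) (by decide)

-- ===== bridge: the scan = B's find-based computation =====

theorem pv_singleton_prefix_drop (l : List Char) (i : Nat) :
    ['/'] <+: l.drop i ↔ l[i]? = some '/' := by
  rw [← List.head?_drop]
  cases hd : l.drop i with
  | nil => simp
  | cons x xs => simp [List.cons_prefix_cons, eq_comm]

-- the scan returns none when neither pattern occurs
theorem pv_scan_none (s : List Char)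
    (h1 : ¬ "/abs/".toList <:+: s) (h2 : ¬ "/pdf/".toList <:+: s) : pvScanB s = none := by
  induction s with
  | nil => simp [pvScanB]
  | cons c rest ih =>
    have hn1 : List.isPrefixOf "/abs/".toList (c :: rest) = false := by
      by_contra hcon
      have : List.isPrefixOf "/abs/".toList (c :: rest) = true := by
        revert hcon; cases List.isPrefixOf "/abs/".toList (c :: rest) <;> simp
      exact h1 (List.isPrefixOf_iff_prefix.mp this).isInfix
    have hn2 : List.isPrefixOf "/pdf/".toList (c :: rest) = false := by
      by_contra hcon
      have : List.isPrefixOf "/pdf/".toList (c :: rest) = true := by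
        revert hcon; cases List.isPrefixOf "/pdf/".toList (c :: rest) <;> simp
      exact h2 (List.isPrefixOf_iff_prefix.mp this).isInfix
    rw [pvScanB, hn1, hn2]
    simp only [Bool.or_self, Bool.false_eq_true, if_false]
    exact ih (fun h => h1 (h.trans (List.suffix_cons c rest).isInfix))
             (fun h => h2 (h.trans (List.suffix_cons c rest).isInfix))

-- the scan returns the id after the leftmost match position
theorem pv_scan_at : ∀ (s : List Char) (j : Nat),
    ("/abs/".toList <+: s.drop j ∨ "/pdf/".toList <+: s.drop j) →
    (∀ i < j, ¬ "/abs/".toList <+: s.drop i ∧ ¬ "/pdf/".toList <+: s.drop i) →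
    pvScanB s = some ((s.drop (j + 5)).takeWhile (· != '/')) := by
  intro s
  induction s with
  | nil =>
    intro j hm _
    rcases hm with hm | hm <;> (rw [List.drop_nil] at hm; rw [pv_abs_toList, pv_pdf_toList] at *) <;>
      simp_all [List.prefix_nil]
  | cons c rest ih =>
    intro j hm hmin
    cases j with
    | zero =>
      have hb : (List.isPrefixOf "/abs/".toList (c :: rest) ||
          List.isPrefixOf "/pdf/".toList (c :: rest)) = true := by
        rcases hm with hm | hm
        · simp [List.isPrefixOf_iff_prefix]; left; simpa using hm
        · simp [List.isPrefixOf_iff_prefix]; right; simpa using hm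
      rw [pvScanB, hb]
      simp
    | succ j' =>
      have h0 := hmin 0 (by omega)
      simp only [List.drop_zero] at h0
      have hn1 : List.isPrefixOf "/abs/".toList (c :: rest) = false := by
        by_contra hcon
        have : List.isPrefixOf "/abs/".toList (c :: rest) = true := by
          revert hcon; cases List.isPrefixOf "/abs/".toList (c :: rest) <;> simp
        exact h0.1 (List.isPrefixOf_iff_prefix.mp this)
      have hn2 : List.isPrefixOf "/pdf/".toList (c :: rest) = false := by
        by_contra hcon
        have : List.isPrefixOf "/pdf/".toList (c :: rest) = true := by
          revert hcon; cases List.isPrefixOf "/pdf/".toList (c :: rest) <;> simp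
        exact h0.2 (List.isPrefixOf_iff_prefix.mp this)
      rw [pvScanB, hn1, hn2]
      simp only [Bool.or_self, Bool.false_eq_true, if_false]
      have hdrop : ∀ (i : Nat), (c :: rest).drop (i + 1) = rest.drop i := by
        intro i; rfl
      rw [show (c :: rest).drop (j' + 1 + 5) = rest.drop (j' + 5) from rfl] at *
      exact ih j' (by rw [← hdrop j']; exact hm)
        (fun i hi => by rw [← hdrop i]; exact hmin (i + 1) (by omega))

-- take up to the first '/' is takeWhile
theorem pv_take_eq_takeWhile (l : List Char) (n : Nat)
    (hall : ∀ i < n, l[i]? ≠ some '/') (hn : l[n]? = some '/') :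
    l.take n = l.takeWhile (· != '/') := by
  induction l generalizing n with
  | nil => simp at hn
  | cons c rest ih =>
    cases n with
    | zero =>
      simp at hn
      rw [List.takeWhile_cons]
      simp [hn]
    | succ n' =>
      have hc : c ≠ '/' := by
        have := hall 0 (by omega)
        simpa using this
      rw [List.take_succ_cons, List.takeWhile_cons]
      simp only [hc, ne_eq, bne_iff_ne, not_false_iff, if_pos]
      rw [ih n' (fun i hi => hall (i + 1) (by omega)) (by simpa using hn)]

-- no '/' anywhere: takeWhile is the identity
theorem pv_takeWhile_all (l : List Char) (h : '/' ∉ l) : l.takeWhile (· != '/') = l := by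
  rw [List.takeWhile_eq_self_iff]
  intro c hc
  simp only [bne_iff_ne, ne_eq]
  intro hh; exact h (hh ▸ hc)

-- main bridge: the match-expression of the scan equals B's find-based tail
theorem pv_scan_eq_findform (s : List Char) :
    (match pvScanB s with
      | some aid =>
          String.ofList (if PySem.Chars.endswith aid ".pdf".toList then PySem.List.slice aid none (some (-4)) else aid)
      | none => "")
    = (let a := PySem.Chars.find s "/abs/".toList
       let p := PySem.Chars.find s "/pdf/".toList
       let j := if a < 0 then p else if p < 0 then a else min a p
       if j < 0 then ""
       else
         let rest := PySem.List.slice s (some (j + 5)) none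
         let k := PySem.Chars.find rest "/".toList
         let seg := if k < 0 then rest else PySem.List.slice rest none (some k)
         String.ofList (if List.isSuffixOf ".pdf".toList seg then seg.take (seg.length - 4) else seg)) := by
  dsimp only
  set a := PySem.Chars.find s "/abs/".toList with ha
  set p := PySem.Chars.find s "/pdf/".toList with hp
  set j := if a < 0 then p else if p < 0 then a else min a p with hj
  by_cases hjn : j < 0
  · -- neither pattern occurs: scan = none, B returns ""
    have hab : a < 0 ∧ p < 0 := by
      rw [hj] at hjn
      by_cases h1 : a < 0
      · refine ⟨h1, ?_⟩; rw [if_pos h1] at hjn; exact hjn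
      · rw [if_neg h1] at hjn
        by_cases h2 : p < 0
        · rw [if_pos h2] at hjn; omega
        · rw [if_neg h2] at hjn; omega
    have hno1 : ¬ "/abs/".toList <:+: s := by
      rw [← PySem.Chars.find_eq_neg_one_iff, ← ha]
      have := PySem.Chars.neg_one_le_find s "/abs/".toList
      rw [← ha] at this; omega
    have hno2 : ¬ "/pdf/".toList <:+: s := by
      rw [← PySem.Chars.find_eq_neg_one_iff, ← hp]
      have := PySem.Chars.neg_one_le_find s "/pdf/".toList
      rw [← hp] at this; omega
    rw [pv_scan_none s hno1 hno2, if_pos hjn]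
  · -- a match exists at j = leftmost position
    have hj0 : 0 ≤ j := by omega
    -- establish: match at j.toNat, none before
    have hkey : ("/abs/".toList <+: s.drop j.toNat ∨ "/pdf/".toList <+: s.drop j.toNat) ∧
        (∀ i < j.toNat, ¬ "/abs/".toList <+: s.drop i ∧ ¬ "/pdf/".toList <+: s.drop i) := by
      have hna : a < 0 → ∀ i, ¬ "/abs/".toList <+: s.drop i := by
        intro h i hpre
        have : "/abs/".toList <:+: s := hpre.isInfix.trans (List.drop_suffix i s).isInfix
        rw [← PySem.Chars.find_ne_neg_one_iff, ← ha] at this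
        have hge := PySem.Chars.neg_one_le_find s "/abs/".toList
        rw [← ha] at hge; omega
      have hnp : p < 0 → ∀ i, ¬ "/pdf/".toList <+: s.drop i := by
        intro h i hpre
        have : "/pdf/".toList <:+: s := hpre.isInfix.trans (List.drop_suffix i s).isInfix
        rw [← PySem.Chars.find_ne_neg_one_iff, ← hp] at this
        have hge := PySem.Chars.neg_one_le_find s "/pdf/".toList
        rw [← hp] at hge; omega
      by_cases h1 : a < 0
      · have hjp : j = p := by rw [hj, if_pos h1]
        have hp0 : 0 ≤ p := by omega
        have hspec := PySem.Chars.find_spec (s := s) (sub := "/pdf/".toList) (by rw [← hp]; omega)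
        rw [← hp] at hspec
        rw [hjp]
        exact ⟨Or.inr hspec.1, fun i hi => ⟨hna h1 i, hspec.2 i hi⟩⟩
      · by_cases h2 : p < 0
        · have hja : j = a := by rw [hj, if_neg h1, if_pos h2]
          have hspec := PySem.Chars.find_spec (s := s) (sub := "/abs/".toList) (by rw [← ha]; omega)
          rw [← ha] at hspec
          rw [hja]
          exact ⟨Or.inl hspec.1, fun i hi => ⟨hspec.2 i hi, hnp h2 i⟩⟩
        · have hjm : j = min a p := by rw [hj, if_neg h1, if_neg h2]
          have hsa := PySem.Chars.find_spec (s := s) (sub := "/abs/".toList) (by rw [← ha]; omega)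
          have hsp2 := PySem.Chars.find_spec (s := s) (sub := "/pdf/".toList) (by rw [← hp]; omega)
          rw [← ha] at hsa; rw [← hp] at hsp2
          constructor
          · rcases le_total a p with hle | hle
            · left; rw [hjm, min_eq_left hle]; exact hsa.1
            · right; rw [hjm, min_eq_right hle]; exact hsp2.1
          · intro i hi
            have hia : i < a.toNat := by
              rw [hjm] at hi
              have : (min a p).toNat ≤ a.toNat := by
                have := min_le_left a p; omega
              omega
            have hip : i < p.toNat := by
              rw [hjm] at hi
              have : (min a p).toNat ≤ p.toNat := by
                have := min_le_right a p; omega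
              omega
            exact ⟨hsa.2 i hia, hsp2.2 i hip⟩
    rw [pv_scan_at s j.toNat hkey.1 hkey.2, if_neg hjn]
    -- rest = s.drop (j.toNat + 5)
    have hrest : PySem.List.slice s (some (j + 5)) none = s.drop (j.toNat + 5) := by
      rw [PySem.List.slice_from s (show (0:Int) ≤ j + 5 by omega)]
      congr 1; omega
    rw [hrest]
    set rest := s.drop (j.toNat + 5) with hrd
    set k := PySem.Chars.find rest "/".toList with hk
    -- seg = takeWhile (· != '/') rest
    have hseg : (if k < 0 then rest else PySem.List.slice rest none (some k))
        = rest.takeWhile (· != '/') := by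
      by_cases hkn : k < 0
      · rw [if_pos hkn]
        have hno : ¬ ['/'] <:+: rest := by
          rw [show ['/'] = "/".toList from rfl, ← PySem.Chars.find_eq_neg_one_iff, ← hk]
          have := PySem.Chars.neg_one_le_find rest "/".toList
          rw [← hk] at this; omega
        have hmem : '/' ∉ rest := by
          intro hmm
          obtain ⟨l1, l2, hsplit⟩ := List.mem_iff_append.mp hmm
          exact hno ⟨l1, l2, by rw [hsplit]; simp⟩
        rw [pv_takeWhile_all rest hmem]
      · rw [if_neg hkn]
        have hspec := PySem.Chars.find_spec (s := rest) (sub := "/".toList) (by rw [← hk]; omega)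
        rw [← hk] at hspec
        rw [PySem.List.slice_to rest (show (0:Int) ≤ k by omega)]
        apply pv_take_eq_takeWhile
        · intro i hi hhit
          exact hspec.2 i hi ((pv_singleton_prefix_drop rest i).mpr hhit)
        · exact (pv_singleton_prefix_drop rest k.toNat).mp hspec.1
    rw [hseg]
    set seg := rest.takeWhile (· != '/') with hsg
    -- A's .pdf massage = B's removesuffix
    show String.ofList (if PySem.Chars.endswith seg ".pdf".toList then PySem.List.slice seg none (some (-4)) else seg)
        = String.ofList (if List.isSuffixOf ".pdf".toList seg then seg.take (seg.length - 4) else seg)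
    have hend : PySem.Chars.endswith seg ".pdf".toList = List.isSuffixOf ".pdf".toList seg := by
      simp [PySem.Chars.endswith, List.isSuffixOf]
    rw [hend]
    by_cases hs : List.isSuffixOf ".pdf".toList seg = true
    · rw [if_pos hs, if_pos hs]
      rw [PySem.List.slice_to_neg_ofNat seg 4 (by omega)]
    · rw [if_neg hs, if_neg hs]

-- ===== VERDICT (by name: the statement is the Claim_ definition above) =====
theorem parse_arxiv_url_spec : Claim_equal_parse_arxiv_url := by
  intro url _ _
  unfold Spec_parse_arxiv_url parse_arxiv_url parse_arxiv_url_alt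
  cases hb : PySem.Chars.startswith (PySem.Chars.strip url.toList) "http".toList with
  | false =>
    rw [pv_http_toList] at hb
    simp [hb]
  | true =>
    have hpfx : "http".toList <+: PySem.Chars.strip url.toList := by
      rw [← PySem.Chars.startswith_iff]; exact hb
    have hb' : (!PySem.Chars.startswith (PySem.Chars.strip url.toList) "http".toList) = false := by
      rw [hb]; rfl
    simp only [hb', Bool.false_eq_true, if_false]
    rw [pv_A_eq_scan _ (pv_rstrip_http _ hpfx)]
    exact pv_scan_eq_findform _
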